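-- pv_equiv track=rewrite | github.com/gkgg123/algorithm_2022 | 1105_팔_version1.py | solve
-- ===== SOURCE A (Python) =====
-- def solve(a,b):
--     cnt = 0
--     if len(a) == len(b):
--         n = len(a)
--         for i in range(n):
--             if a[i] == b[i] == "8":
--                 cnt += 1
--             elif a[i] != b[i]:
--                 return cnt
--     return cnt
-- ===== SOURCE B (Python) =====
-- def solve(a, b):
--     if len(a) != len(b):
--         return 0
--     i = next((k for k, (x, y) in enumerate(zip(a, b)) if x != y), len(a))
--     return a[:i].count('8')
-- ===== Notes on version B (the rewrite author's own statement) =====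
-- stated objective: simpler
-- what changed: Replaces the fused early-exit counting loop with finding the first-mismatch index and then counting '8's in that prefix of a.
import Mathlib
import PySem

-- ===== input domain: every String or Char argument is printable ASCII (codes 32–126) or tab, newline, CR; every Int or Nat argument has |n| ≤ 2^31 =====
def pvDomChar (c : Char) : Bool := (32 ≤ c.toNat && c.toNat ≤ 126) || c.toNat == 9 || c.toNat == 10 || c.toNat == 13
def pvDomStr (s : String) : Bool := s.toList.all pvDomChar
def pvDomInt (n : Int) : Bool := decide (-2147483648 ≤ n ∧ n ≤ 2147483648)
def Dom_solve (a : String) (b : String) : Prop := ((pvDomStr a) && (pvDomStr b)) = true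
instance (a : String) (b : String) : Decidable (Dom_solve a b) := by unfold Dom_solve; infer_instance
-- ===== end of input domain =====

-- B replaces the fused early-exit counting loop with find-first-mismatch then count '8's in that prefix (simpler decomposition).

-- ===== PORT A =====
-- the 'for i in range(n)' loop with early return, as structural recursion over the two char lists in step
def solveLoop (xs ys : List Char) (cnt : Int) : Int :=
  match xs, ys with
  | x :: xs', y :: ys' =>
      if x = y ∧ x = '8' then solveLoop xs' ys' (cnt + 1)
      else if x ≠ y then cnt
      else solveLoop xs' ys' cnt
  | _, _ => cnt

def solve (a : String) (b : String) : Int :=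
  if a.toList.length = b.toList.length then solveLoop a.toList b.toList 0 else 0

-- ===== PORT B =====
-- index of the first differing pair (default: length of the zip), as in Source B's next(... enumerate(zip ...))
def firstDiff (ps : List (Char × Char)) : Nat :=
  match ps with
  | [] => 0
  | (x, y) :: rest => if x ≠ y then 0 else 1 + firstDiff rest

def solve_alt (a : String) (b : String) : Int :=
  if a.toList.length ≠ b.toList.length then 0
  else ((a.toList.take (firstDiff (a.toList.zip b.toList))).count '8' : Int)

-- ===== PRECONDITION & SPEC =====
def Spec_solve (a : String) (b : String) (out : Int) : Prop := out = solve_alt a b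
instance (a : String) (b : String) (out : Int) : Decidable (Spec_solve a b out) := by unfold Spec_solve; infer_instance

-- ===== CLAIM (what is proved, stated in full; the proofs are below) =====
def Claim_equal_solve : Prop := ∀ (a : String) (b : String), Dom_solve a b → Spec_solve a b (solve a b)

-- ===== LEMMAS AND PROOFS =====
theorem solveLoop_eq (xs : List Char) : ∀ (ys : List Char) (cnt : Int),
    solveLoop xs ys cnt = cnt + ((xs.take (firstDiff (xs.zip ys))).count '8' : Int) := by
  induction xs with
  | nil => intro ys cnt; cases ys <;> simp [solveLoop, firstDiff]
  | cons x xs' ih =>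
    intro ys cnt
    cases ys with
    | nil => simp [solveLoop, firstDiff]
    | cons y ys' =>
      by_cases hxy : x = y
      · subst hxy
        by_cases h8 : x = '8'
        · simp [solveLoop, firstDiff, h8, ih, Nat.add_comm 1]
          ring
        · simp [solveLoop, firstDiff, h8, ih, Nat.add_comm 1]
      · simp [solveLoop, firstDiff, hxy]

-- ===== VERDICT (by name: the statement is the Claim_ definition above) =====
theorem solve_spec : Claim_equal_solve := by
  intro a b _
  unfold Spec_solve solve solve_alt
  rcases eq_or_ne a.toList.length b.toList.length with h | h
  · simp [h, solveLoop_eq]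
  · have h' : a.length ≠ b.length := by simpa using h
    simp [h']
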